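-- pv_equiv track=rewrite | github.com/alex-s-hong/code_prep | akuna_practice/oscillating_string.py | oscillator
-- ===== SOURCE A (Python) =====
-- def oscillator(s: str):
--     """
--     ascend and descend as a one piece (block),
--     if block is not used, call its own
--     """
--     l = sorted(s)
--
--     # initialize
--     res = l.pop(0)
--
--     if not l:
--         return res
--
--     isOs = True
--     while l and isOs:
--         isOs = False
--         i = 0
--         # ascend
--         while i < len(l):
--             if res[-1] < l[i]:
--                 res += l.pop(i)
--                 isOs = True
--             else:
--                 i +=1
--         # i should be as same as len(l)
--         i = len(l) -1
--         # descend
--         while l and i > -1: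
--             if res[-1] > l[i]:
--                 isOs = True
--                 res += l.pop(i)
--             i -=1
--     if l:
--         res += ''.join(l)
--
--     return res
-- ===== SOURCE B (Python) =====
-- def oscillator(s: str):
--     # run-length encode the sorted characters once, then emit alternating
--     # ascending/descending layers by walking the (char, count) groups
--     l = sorted(s)
--     groups = []
--     for c in l:
--         if groups and groups[-1][0] == c:
--             groups[-1][1] += 1
--         else:
--             groups.append([c, 1])
--     first = groups[0]          # IndexError on empty input, like A
--     first[1] -= 1
--     out = [first[0]]
--     last = first[0]
--     while True:
--         moved = False
--         for g in groups:
--             if g[0] > last and g[1] > 0: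
--                 out.append(g[0]); g[1] -= 1; last = g[0]; moved = True
--         for g in reversed(groups):
--             if g[0] < last and g[1] > 0:
--                 out.append(g[0]); g[1] -= 1; last = g[0]; moved = True
--         if not moved:
--             out.append(last * sum(g[1] for g in groups))
--             return ''.join(out)
-- ===== Notes on version B (the rewrite author's own statement) =====
-- stated objective: faster
-- what changed: B run-length-encodes the sorted characters once and emits each alternating ascending/descending layer by a single walk over the distinct (char, count) groups, instead of A's repeated index scans with list.pop over the full character list.
import Mathlib
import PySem

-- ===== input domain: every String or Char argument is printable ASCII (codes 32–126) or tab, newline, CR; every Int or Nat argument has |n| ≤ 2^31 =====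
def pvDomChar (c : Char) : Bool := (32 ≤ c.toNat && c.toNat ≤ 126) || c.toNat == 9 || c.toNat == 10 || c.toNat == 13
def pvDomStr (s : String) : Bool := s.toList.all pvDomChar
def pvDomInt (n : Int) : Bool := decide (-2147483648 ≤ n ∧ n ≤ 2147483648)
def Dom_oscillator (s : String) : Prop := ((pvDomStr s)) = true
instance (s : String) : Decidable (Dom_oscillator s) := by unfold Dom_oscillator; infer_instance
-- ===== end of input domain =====

-- B replaces A's quadratic pop-and-rescan over the sorted character list by one run-length
-- encoding of the sorted characters and per-round walks over the distinct (char, count) groups.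

-- ===== PORT A =====
-- inner ascend loop: while i < len(l): pop at i or advance i  (res[-1] is getLast!; res is never empty)
def ascendA : Nat → List Char → List Char → Nat → Bool → List Char × List Char × Bool
  | 0, res, l, _, os => (res, l, os)
  | fuel+1, res, l, i, os =>
    if h : i < l.length then
      if res.getLast! < l[i] then
        ascendA fuel (res ++ [l[i]]) (l.take i ++ l.drop (i+1)) i true
      else
        ascendA fuel res l (i+1) os
    else (res, l, os)

-- inner descend loop: while l and i > -1: maybe pop at i, then i -= 1
def descendA : Nat → List Char → List Char → Int → Bool → List Char × List Char × Bool
  | 0, res, l, _, os => (res, l, os)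
  | fuel+1, res, l, i, os =>
    if l ≠ [] ∧ -1 < i then
      match PySem.List.pyGet? l i with
      | some c =>
        if res.getLast! > c then
          descendA fuel (res ++ [c]) (l.take i.toNat ++ l.drop (i.toNat+1)) (i-1) true
        else
          descendA fuel res l (i-1) os
      | none => (res, l, os)
    else (res, l, os)

-- outer loop: while l and isOs (fuel only makes the recursion structural; it is never exhausted)
def loopA : Nat → List Char → List Char → List Char × List Char
  | 0, res, l => (res, l)
  | fuel+1, res, l =>
    if l = [] then (res, l)
    else
      let r1 := ascendA l.length res l 0 false
      let r2 := descendA r1.2.1.length r1.1 r1.2.1 ((r1.2.1.length : Int) - 1) r1.2.2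
      if r2.2.2 then loopA fuel r2.1 r2.2.1 else (r2.1, r2.2.1)

def oscillator (s : String) : String :=
  match PySem.List.sorted s.toList (fun c => c) with
  | [] => ""   -- Python raises IndexError here (l.pop(0) on empty); excluded by Pre_
  | c :: rest =>
    if rest = [] then String.ofList [c]
    else
      let r := loopA (rest.length + 1) [c] rest
      String.ofList (if r.2 ≠ [] then r.1 ++ r.2 else r.1)

-- ===== PORT B =====
-- run-length encoding step: merge into the last group or open a new one
def stepRLE (g : List (Char × Int)) (c : Char) : List (Char × Int) :=
  match g.getLast? with
  | some p => if p.1 = c then g.dropLast ++ [(p.1, p.2 + 1)] else g ++ [(c, 1)]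
  | none => [(c, 1)]

def buildGroups (l : List Char) : List (Char × Int) := l.foldl stepRLE []

-- one ascending pass over the groups (Source B's first for-loop), threading `last`
def ascB : Char → List (Char × Int) → List Char × List (Char × Int) × Char
  | last, [] => ([], [], last)
  | last, (c, k) :: g =>
    if c > last ∧ k > 0 then
      let r := ascB c g
      (c :: r.1, (c, k - 1) :: r.2.1, r.2.2)
    else
      let r := ascB last g
      (r.1, (c, k) :: r.2.1, r.2.2)

-- one descending pass (Source B's `for g in reversed(groups)`), applied to the reversed group list
def descB : Char → List (Char × Int) → List Char × List (Char × Int) × Char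
  | last, [] => ([], [], last)
  | last, (c, k) :: g =>
    if c < last ∧ k > 0 then
      let r := descB c g
      (c :: r.1, (c, k - 1) :: r.2.1, r.2.2)
    else
      let r := descB last g
      (r.1, (c, k) :: r.2.1, r.2.2)

-- Source B's `while True` loop (fuel only makes the recursion structural; it is never exhausted)
def loopB : Nat → List Char → List (Char × Int) → Char → List Char
  | 0, out, _, _ => out
  | fuel+1, out, groups, last =>
    let a := ascB last groups
    let d := descB a.2.2 a.2.1.reverse
    if a.1 = [] ∧ d.1 = [] then
      out ++ List.replicate ((groups.map (fun p : Char × Int => p.2)).sum.toNat) last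
    else
      loopB fuel (out ++ a.1 ++ d.1) d.2.1.reverse d.2.2

def oscillator_alt (s : String) : String :=
  match buildGroups (PySem.List.sorted s.toList (fun c => c)) with
  | [] => ""   -- Python raises IndexError here (groups[0] on empty); excluded by Pre_
  | (c, k) :: g =>
    String.ofList (loopB s.toList.length [c] ((c, k - 1) :: g) c)

-- ===== PRECONDITION & SPEC =====
-- Pre_ excludes only the empty string, on which both A and B raise IndexError.
def Pre_oscillator (s : String) : Prop := s ≠ ""
instance (s : String) : Decidable (Pre_oscillator s) := by unfold Pre_oscillator; infer_instance
def pvWitness_oscillator : String := "baab"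
def Spec_oscillator (s : String) (out : String) : Prop := out = oscillator_alt s
instance (s : String) (out : String) : Decidable (Spec_oscillator s out) := by unfold Spec_oscillator; infer_instance

-- ===== CLAIM (what is proved, stated in full; the proofs are below) =====
def Claim_equal_oscillator : Prop := ∀ (s : String), Dom_oscillator s → Pre_oscillator s → Spec_oscillator s (oscillator s)

-- ===== LEMMAS AND PROOFS =====

-- the multiset a group list denotes, in order
def expand (g : List (Char × Int)) : List Char := g.flatMap (fun p => List.replicate p.2.toNat p.1)

-- what one ascend pass picks and leaves, defined structurally on the (sorted) char list
def ascSpec (last : Char) : List Char → List Char × List Char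
  | [] => ([], [])
  | c :: t => if last < c then ((ascSpec c t).1.cons c, (ascSpec c t).2)
              else ((ascSpec last t).1, (ascSpec last t).2.cons c)

-- what one descend pass picks and leaves, on the REVERSED char list
def dSpecR (last : Char) : List Char → List Char × List Char
  | [] => ([], [])
  | c :: t => if c < last then ((dSpecR c t).1.cons c, (dSpecR c t).2)
              else ((dSpecR last t).1, (dSpecR last t).2.cons c)

theorem expand_nil : expand [] = [] := rfl

theorem expand_cons (c : Char) (k : Int) (g : List (Char × Int)) :
    expand ((c, k) :: g) = List.replicate k.toNat c ++ expand g := rfl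

theorem gl_bang (l : List Char) (h : l ≠ []) : l.getLast? = some l.getLast! := by
  cases l with
  | nil => exact absurd rfl h
  | cons a t => rw [List.getLast?_eq_getLast_of_ne_nil (by simp)]; rfl

theorem getLast!_append (res p : List Char) :
    (res ++ p).getLast! = p.getLastD res.getLast! := by
  cases hp : p with
  | nil => simp
  | cons b q =>
    have h1 := gl_bang (res ++ b::q) (by simp)
    have h2 := gl_bang (b::q) (by simp)
    rw [List.getLast?_append, h2] at h1
    rw [List.getLastD_eq_getLast?, h2]
    simp at h1 ⊢
    exact h1.symm

theorem ascendA_spec (suf : List Char) : ∀ (pre res : List Char) (os : Bool) (fuel : Nat),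
    suf.length ≤ fuel →
    ascendA fuel res (pre ++ suf) pre.length os =
      (res ++ (ascSpec res.getLast! suf).1, pre ++ (ascSpec res.getLast! suf).2,
       os || !(ascSpec res.getLast! suf).1.isEmpty) := by
  induction suf with
  | nil =>
    intro pre res os fuel _
    cases fuel with
    | zero => simp [ascendA, ascSpec]
    | succ f => simp [ascendA, ascSpec]
  | cons c t ih =>
    intro pre res os fuel hf
    cases fuel with
    | zero => simp at hf
    | succ f =>
      have hlen : pre.length < (pre ++ c :: t).length := by simp
      have hget : (pre ++ c :: t)[pre.length] = c := by
        rw [List.getElem_append_right (le_refl pre.length)]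
        simp
      rw [show ascendA (f+1) res (pre ++ c :: t) pre.length os =
          (if res.getLast! < (pre ++ c :: t)[pre.length] then
            ascendA f (res ++ [(pre ++ c :: t)[pre.length]])
              ((pre ++ c :: t).take pre.length ++ (pre ++ c :: t).drop (pre.length+1)) pre.length true
          else ascendA f res (pre ++ c :: t) (pre.length+1) os) from by
        simp [ascendA]]
      rw [hget]
      by_cases hc : res.getLast! < c
      · rw [if_pos hc]
        have htake : (pre ++ c :: t).take pre.length = pre := List.take_left
        have hdrop : (pre ++ c :: t).drop (pre.length + 1) = t := by
          rw [show pre ++ c :: t = (pre ++ [c]) ++ t from by simp,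
            List.drop_left' (by simp)]
        rw [htake, hdrop]
        rw [ih pre (res ++ [c]) true f (by simpa using hf)]
        rw [getLast!_append res [c]]
        rw [show ([c] : List Char).getLastD res.getLast! = c from rfl]
        rw [show ascSpec res.getLast! (c :: t) = (c :: (ascSpec c t).1, (ascSpec c t).2) from by
          simp only [ascSpec, if_pos hc]]
        simp
      · rw [if_neg hc]
        rw [show pre ++ c :: t = (pre ++ [c]) ++ t from by simp]
        rw [show pre.length + 1 = (pre ++ [c]).length from by simp]
        rw [ih (pre ++ [c]) res os f (by simpa using hf)]
        rw [show ascSpec res.getLast! (c :: t) =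
            ((ascSpec res.getLast! t).1, c :: (ascSpec res.getLast! t).2) from by
          simp only [ascSpec, if_neg hc]]
        simp


theorem descendA_spec (rl : List Char) : ∀ (suf res : List Char) (os : Bool) (fuel : Nat),
    rl.length ≤ fuel →
    descendA fuel res (rl.reverse ++ suf) ((rl.length : Int) - 1) os =
      (res ++ (dSpecR res.getLast! rl).1, (dSpecR res.getLast! rl).2.reverse ++ suf,
       os || !(dSpecR res.getLast! rl).1.isEmpty) := by
  induction rl with
  | nil =>
    intro suf res os fuel _
    cases fuel with
    | zero => simp [descendA, dSpecR]
    | succ f => simp [descendA, dSpecR]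
  | cons c t ih =>
    intro suf res os fuel hf
    cases fuel with
    | zero => simp at hf
    | succ f =>
      have hL : (c :: t).reverse ++ suf = t.reverse ++ c :: suf := by simp
      have hi : ((c :: t).length : Int) - 1 = (t.length : Int) := by simp
      rw [hL, hi]
      have hne : t.reverse ++ c :: suf ≠ [] := by simp
      have hcond : (t.reverse ++ c :: suf ≠ [] ∧ (-1 : Int) < (t.length : Int)) := by
        constructor
        · exact hne
        · omega
      have hget : PySem.List.pyGet? (t.reverse ++ c :: suf) ((t.length : Int)) = some c := by
        rw [PySem.List.pyGet?_natCast]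
        rw [show (t.length : Nat) = t.reverse.length from by simp]
        simp
      have htoNat : ((t.length : Int)).toNat = t.length := by simp
      rw [show descendA (f+1) res (t.reverse ++ c :: suf) ((t.length : Int)) os =
          (if res.getLast! > c then
            descendA f (res ++ [c])
              ((t.reverse ++ c :: suf).take t.length ++ (t.reverse ++ c :: suf).drop (t.length+1))
              ((t.length : Int) - 1) true
          else descendA f res (t.reverse ++ c :: suf) ((t.length : Int) - 1) os) from by
        simp only [descendA, if_pos hcond, hget, htoNat]]
      by_cases hc : res.getLast! > c
      · rw [if_pos hc]
        have htake : (t.reverse ++ c :: suf).take t.length = t.reverse := by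
          rw [show (t.length : Nat) = t.reverse.length from by simp]
          exact List.take_left
        have hdrop : (t.reverse ++ c :: suf).drop (t.length + 1) = suf := by
          rw [show t.reverse ++ c :: suf = (t.reverse ++ [c]) ++ suf from by simp,
            List.drop_left' (by simp)]
        rw [htake, hdrop]
        rw [ih suf (res ++ [c]) true f (by simpa using hf)]
        rw [getLast!_append res [c]]
        rw [show ([c] : List Char).getLastD res.getLast! = c from rfl]
        rw [show dSpecR res.getLast! (c :: t) = (c :: (dSpecR c t).1, (dSpecR c t).2) from by
          simp only [dSpecR, if_pos hc]]
        simp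
      · rw [if_neg hc]
        rw [show t.reverse ++ c :: suf = t.reverse ++ (c :: suf) from rfl]
        rw [ih (c :: suf) res os f (by simpa using hf)]
        rw [show dSpecR res.getLast! (c :: t) =
            ((dSpecR res.getLast! t).1, c :: (dSpecR res.getLast! t).2) from by
          simp only [dSpecR, if_neg (by exact fun h => hc h)]]
        simp


theorem ascSpec_replicate (last c : Char) (h : ¬ last < c) (m : Nat) (rest : List Char) :
    ascSpec last (List.replicate m c ++ rest) =
      ((ascSpec last rest).1, List.replicate m c ++ (ascSpec last rest).2) := by
  induction m with
  | zero => simp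
  | succ n ih => simp [List.replicate_succ, ascSpec, h, ih]

theorem dSpecR_replicate (last c : Char) (h : ¬ c < last) (m : Nat) (rest : List Char) :
    dSpecR last (List.replicate m c ++ rest) =
      ((dSpecR last rest).1, List.replicate m c ++ (dSpecR last rest).2) := by
  induction m with
  | zero => simp
  | succ n ih => simp [List.replicate_succ, dSpecR, h, ih]

theorem ascB_spec (g : List (Char × Int)) : ∀ (last : Char),
    ascSpec last (expand g) = ((ascB last g).1, expand (ascB last g).2.1) ∧
    (ascB last g).2.2 = (ascB last g).1.getLastD last := by
  induction g with
  | nil => intro last; simp [ascB, expand, ascSpec]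
  | cons p t ih =>
    obtain ⟨c, k⟩ := p
    intro last
    by_cases h : c > last ∧ k > 0
    · obtain ⟨h1, h2⟩ := h
      have hk : k.toNat = (k - 1).toNat + 1 := by omega
      have e1 : expand ((c, k) :: t) = c :: (List.replicate (k - 1).toNat c ++ expand t) := by
        rw [show expand ((c, k) :: t) = List.replicate k.toNat c ++ expand t from rfl, hk,
          List.replicate_succ]
        simp
      have e2 : ascB last ((c, k) :: t) =
          (c :: (ascB c t).1, (c, k - 1) :: (ascB c t).2.1, (ascB c t).2.2) := by
        simp [ascB, h1, h2]
      obtain ⟨ih1, ih2⟩ := ih c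
      rw [e1, e2]
      constructor
      · show ascSpec last (c :: (List.replicate (k - 1).toNat c ++ expand t)) = _
        rw [show ascSpec last (c :: (List.replicate (k - 1).toNat c ++ expand t)) =
          ((ascSpec c (List.replicate (k - 1).toNat c ++ expand t)).1.cons c,
           (ascSpec c (List.replicate (k - 1).toNat c ++ expand t)).2) from by simp [ascSpec, h1]]
        rw [ascSpec_replicate c c (lt_irrefl c) _ (expand t), ih1]
        simp [expand]
      · rw [ih2]
        show _ = (c :: (ascB c t).1).getLastD last
        rw [List.getLastD_eq_getLast?, List.getLastD_eq_getLast?, List.getLast?_cons]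
        simp
    · have e2 : ascB last ((c, k) :: t) =
          ((ascB last t).1, (c, k) :: (ascB last t).2.1, (ascB last t).2.2) := by
        rcases Decidable.not_and_iff_or_not.mp h with h' | h' <;> simp [ascB, h']
      obtain ⟨ih1, ih2⟩ := ih last
      have key : ascSpec last (List.replicate k.toNat c ++ expand t) =
          ((ascSpec last (expand t)).1, List.replicate k.toNat c ++ (ascSpec last (expand t)).2) := by
        rcases Decidable.not_and_iff_or_not.mp h with h' | h'
        · exact ascSpec_replicate last c (by intro hlt; exact h' hlt) _ _
        · have : k.toNat = 0 := by omega
          simp [this]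
      rw [e2]
      constructor
      · show ascSpec last (expand ((c, k) :: t)) = _
        rw [show expand ((c, k) :: t) = List.replicate k.toNat c ++ expand t from rfl]
        rw [key, ih1]
        simp [expand]
      · exact ih2

theorem descB_spec (g : List (Char × Int)) : ∀ (last : Char),
    dSpecR last (expand g) = ((descB last g).1, expand (descB last g).2.1) ∧
    (descB last g).2.2 = (descB last g).1.getLastD last := by
  induction g with
  | nil => intro last; simp [descB, expand, dSpecR]
  | cons p t ih =>
    obtain ⟨c, k⟩ := p
    intro last
    by_cases h : c < last ∧ k > 0
    · obtain ⟨h1, h2⟩ := h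
      have hk : k.toNat = (k - 1).toNat + 1 := by omega
      have e1 : expand ((c, k) :: t) = c :: (List.replicate (k - 1).toNat c ++ expand t) := by
        rw [show expand ((c, k) :: t) = List.replicate k.toNat c ++ expand t from rfl, hk,
          List.replicate_succ]
        simp
      have e2 : descB last ((c, k) :: t) =
          (c :: (descB c t).1, (c, k - 1) :: (descB c t).2.1, (descB c t).2.2) := by
        simp [descB, h1, h2]
      obtain ⟨ih1, ih2⟩ := ih c
      rw [e1, e2]
      constructor
      · show dSpecR last (c :: (List.replicate (k - 1).toNat c ++ expand t)) = _
        rw [show dSpecR last (c :: (List.replicate (k - 1).toNat c ++ expand t)) =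
          ((dSpecR c (List.replicate (k - 1).toNat c ++ expand t)).1.cons c,
           (dSpecR c (List.replicate (k - 1).toNat c ++ expand t)).2) from by simp [dSpecR, h1]]
        rw [dSpecR_replicate c c (lt_irrefl c) _ (expand t), ih1]
        simp [expand]
      · rw [ih2]
        show _ = (c :: (descB c t).1).getLastD last
        rw [List.getLastD_eq_getLast?, List.getLastD_eq_getLast?, List.getLast?_cons]
        simp
    · have e2 : descB last ((c, k) :: t) =
          ((descB last t).1, (c, k) :: (descB last t).2.1, (descB last t).2.2) := by
        rcases Decidable.not_and_iff_or_not.mp h with h' | h' <;> simp [descB, h']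
      obtain ⟨ih1, ih2⟩ := ih last
      have key : dSpecR last (List.replicate k.toNat c ++ expand t) =
          ((dSpecR last (expand t)).1, List.replicate k.toNat c ++ (dSpecR last (expand t)).2) := by
        rcases Decidable.not_and_iff_or_not.mp h with h' | h'
        · exact dSpecR_replicate last c (by intro hlt; exact h' hlt) _ _
        · have : k.toNat = 0 := by omega
          simp [this]
      rw [e2]
      constructor
      · show dSpecR last (expand ((c, k) :: t)) = _
        rw [show expand ((c, k) :: t) = List.replicate k.toNat c ++ expand t from rfl]
        rw [key, ih1]
        simp [expand]
      · exact ih2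

theorem expand_reverse (g : List (Char × Int)) : expand g.reverse = (expand g).reverse := by
  induction g with
  | nil => rfl
  | cons p t ih => simp [expand, List.flatMap_append] at ih ⊢; simp [ih]

theorem ascSpec_nil (last : Char) (l : List Char) (h : (ascSpec last l).1 = []) :
    (ascSpec last l).2 = l ∧ ∀ c ∈ l, ¬ last < c := by
  induction l generalizing last with
  | nil => simp [ascSpec]
  | cons c t ih =>
    by_cases hc : last < c
    · simp [ascSpec, hc] at h
    · simp only [ascSpec, if_neg hc] at h ⊢
      obtain ⟨h1, h2⟩ := ih last h
      refine ⟨by simp [h1], ?_⟩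
      intro x hx
      rcases List.mem_cons.mp hx with rfl | hx
      · exact hc
      · exact h2 x hx

theorem dSpecR_nil (last : Char) (l : List Char) (h : (dSpecR last l).1 = []) :
    (dSpecR last l).2 = l ∧ ∀ c ∈ l, ¬ c < last := by
  induction l generalizing last with
  | nil => simp [dSpecR]
  | cons c t ih =>
    by_cases hc : c < last
    · simp [dSpecR, hc] at h
    · simp only [dSpecR, if_neg hc] at h ⊢
      obtain ⟨h1, h2⟩ := ih last h
      refine ⟨by simp [h1], ?_⟩
      intro x hx
      rcases List.mem_cons.mp hx with rfl | hx
      · exact hc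
      · exact h2 x hx

theorem ascSpec_length (last : Char) (l : List Char) :
    (ascSpec last l).1.length + (ascSpec last l).2.length = l.length := by
  induction l generalizing last with
  | nil => simp [ascSpec]
  | cons c t ih =>
    by_cases hc : last < c
    · have := ih c; simp [ascSpec, hc]; omega
    · have := ih last; simp [ascSpec, hc]; omega

theorem dSpecR_length (last : Char) (l : List Char) :
    (dSpecR last l).1.length + (dSpecR last l).2.length = l.length := by
  induction l generalizing last with
  | nil => simp [dSpecR]
  | cons c t ih =>
    by_cases hc : c < last
    · have := ih c; simp [dSpecR, hc]; omega
    · have := ih last; simp [dSpecR, hc]; omega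

theorem ascB_nonneg (g : List (Char × Int)) : ∀ (last : Char), (∀ p ∈ g, 0 ≤ p.2) →
    ∀ p ∈ (ascB last g).2.1, 0 ≤ p.2 := by
  induction g with
  | nil => intro last _ p hp; simp [ascB] at hp
  | cons q t ih =>
    obtain ⟨c, k⟩ := q
    intro last hg p hp
    by_cases h : c > last ∧ k > 0
    · simp only [ascB, if_pos h] at hp
      rcases List.mem_cons.mp hp with rfl | hp
      · simp; omega
      · exact ih c (fun r hr => hg r (by simp [hr])) p hp
    · simp only [ascB, if_neg h] at hp
      rcases List.mem_cons.mp hp with rfl | hp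
      · exact hg (c, k) (by simp)
      · exact ih last (fun r hr => hg r (by simp [hr])) p hp

theorem descB_nonneg (g : List (Char × Int)) : ∀ (last : Char), (∀ p ∈ g, 0 ≤ p.2) →
    ∀ p ∈ (descB last g).2.1, 0 ≤ p.2 := by
  induction g with
  | nil => intro last _ p hp; simp [descB] at hp
  | cons q t ih =>
    obtain ⟨c, k⟩ := q
    intro last hg p hp
    by_cases h : c < last ∧ k > 0
    · simp only [descB, if_pos h] at hp
      rcases List.mem_cons.mp hp with rfl | hp
      · simp; omega
      · exact ih c (fun r hr => hg r (by simp [hr])) p hp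
    · simp only [descB, if_neg h] at hp
      rcases List.mem_cons.mp hp with rfl | hp
      · exact hg (c, k) (by simp)
      · exact ih last (fun r hr => hg r (by simp [hr])) p hp

theorem length_expand (g : List (Char × Int)) (h : ∀ p ∈ g, 0 ≤ p.2) :
    (expand g).length = ((g.map (fun p : Char × Int => p.2)).sum).toNat := by
  induction g with
  | nil => rfl
  | cons p t ih =>
    have hp : 0 ≤ p.2 := h p (by simp)
    have ht : ∀ q ∈ t, 0 ≤ q.2 := fun q hq => h q (by simp [hq])
    have hs : 0 ≤ (t.map (fun p : Char × Int => p.2)).sum := by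
      apply List.sum_nonneg; intro x hx; obtain ⟨q, hq, rfl⟩ := List.mem_map.mp hx; exact ht q hq
    have e : (expand (p :: t)).length = p.2.toNat + (expand t).length := by simp [expand]
    rw [e, ih ht]
    rw [show ((p :: t).map (fun p : Char × Int => p.2)).sum
        = p.2 + (t.map (fun p : Char × Int => p.2)).sum from by simp]
    omega

theorem stepRLE_expand (acc : List (Char × Int)) (c : Char) (h : ∀ p ∈ acc, 1 ≤ p.2) :
    expand (stepRLE acc c) = expand acc ++ [c] ∧ (∀ p ∈ stepRLE acc c, 1 ≤ p.2) := by
  rcases hL : acc.getLast? with _ | p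
  · have : acc = [] := by simpa using hL
    subst this
    simp [stepRLE, expand]
  · have hacc : acc.dropLast ++ [p] = acc := List.dropLast_append_getLast? p hL
    have hp1 : 1 ≤ p.2 := h p (by rw [← hacc]; simp)
    have hdrop : ∀ q ∈ acc.dropLast, 1 ≤ q.2 := fun q hq => h q (List.dropLast_subset _ hq)
    by_cases hc : p.1 = c
    · have e : stepRLE acc c = acc.dropLast ++ [(p.1, p.2 + 1)] := by
        simp [stepRLE, hL, hc]
      constructor
      · rw [e, ← hacc]
        simp [expand, List.flatMap_append]
        rw [show (p.2 + 1).toNat = p.2.toNat + 1 from by omega, List.replicate_succ']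
        simp [hc]
      · intro q hq
        rw [e] at hq
        rcases List.mem_append.mp hq with hq | hq
        · exact hdrop q hq
        · simp at hq; subst hq; simp; omega
    · have e : stepRLE acc c = acc ++ [(c, 1)] := by
        simp [stepRLE, hL, hc]
      constructor
      · rw [e]; simp [expand, List.flatMap_append]
      · intro q hq
        rcases List.mem_append.mp (e ▸ hq) with hq | hq
        · exact h q hq
        · simp at hq; subst hq; simp

theorem buildGroups_spec (l : List Char) : ∀ (acc : List (Char × Int)), (∀ p ∈ acc, 1 ≤ p.2) →
    expand (List.foldl stepRLE acc l) = expand acc ++ l ∧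
    (∀ p ∈ List.foldl stepRLE acc l, 1 ≤ p.2) := by
  induction l with
  | nil => intro acc h; exact ⟨by simp, h⟩
  | cons c t ih =>
    intro acc h
    obtain ⟨e1, e2⟩ := stepRLE_expand acc c h
    obtain ⟨f1, f2⟩ := ih (stepRLE acc c) e2
    refine ⟨?_, f2⟩
    simp [List.foldl_cons, f1, e1]

theorem loop_lockstep : ∀ (f1 f2 : Nat) (l : List Char) (g : List (Char × Int))
    (res : List Char) (last : Char),
    l.length < f1 → l.length < f2 → expand g = l → (∀ p ∈ g, 0 ≤ p.2) →
    res ≠ [] → res.getLast! = last →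
    (loopA f1 res l).1 ++ (loopA f1 res l).2 = loopB f2 res g last := by
  intro f1
  induction f1 with
  | zero => intro f2 l g res last h1; exact absurd h1 (Nat.not_lt_zero _)
  | succ f ih =>
    intro f2 l g res last hf1 hf2 hexp hnn hres hlast
    cases f2 with
    | zero => exact absurd hf2 (Nat.not_lt_zero _)
    | succ f2' =>
      obtain ⟨a1, a2⟩ := ascB_spec g last
      rw [hexp] at a1
      have hP1 : (ascSpec last l).1 = (ascB last g).1 := by rw [a1]
      have hR1 : (ascSpec last l).2 = expand (ascB last g).2.1 := by rw [a1]
      have hla1 : (ascB last g).2.2 = (res ++ (ascSpec last l).1).getLast! := by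
        rw [a2, getLast!_append, hlast, hP1]
      obtain ⟨d1, d2⟩ := descB_spec ((ascB last g).2.1.reverse) (ascB last g).2.2
      rw [expand_reverse, ← hR1] at d1
      have hP2 : (dSpecR (ascB last g).2.2 (ascSpec last l).2.reverse).1
          = (descB (ascB last g).2.2 (ascB last g).2.1.reverse).1 := by rw [d1]
      have hR2 : (dSpecR (ascB last g).2.2 (ascSpec last l).2.reverse).2
          = expand (descB (ascB last g).2.2 (ascB last g).2.1.reverse).2.1 := by
        rw [d1]
      have ha := ascendA_spec l [] res false l.length (le_refl _)
      simp only [List.nil_append, List.length_nil] at ha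
      rw [hlast] at ha
      have hd := descendA_spec ((ascSpec last l).2.reverse) [] (res ++ (ascSpec last l).1)
        (false || !(ascSpec last l).1.isEmpty) ((ascSpec last l).2.reverse.length)
        (le_refl _)
      simp only [List.reverse_reverse, List.append_nil, List.length_reverse] at hd
      rw [← hla1] at hd
      by_cases hl : l = []
      · subst hl
        have hP1e : (ascB last g).1 = [] := by rw [← hP1]; rfl
        have hP2e : (descB (ascB last g).2.2 (ascB last g).2.1.reverse).1 = [] := by
          rw [← hP2]
          rw [show (ascSpec last ([] : List Char)).2 = [] from rfl]
          rfl
        have hsum : ((g.map (fun p : Char × Int => p.2)).sum).toNat = 0 := by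
          rw [← length_expand g hnn, hexp]
          rfl
        simp only [loopA, loopB, if_pos (And.intro hP1e hP2e), hsum]
        simp
      · have hstepA : loopA (f+1) res l =
            (if (false || !(ascSpec last l).1.isEmpty)
                  || !(dSpecR (ascB last g).2.2
                      (ascSpec last l).2.reverse).1.isEmpty then
              loopA f (res ++ (ascSpec last l).1 ++
                  (dSpecR (ascB last g).2.2
                      (ascSpec last l).2.reverse).1)
                ((dSpecR (ascB last g).2.2
                      (ascSpec last l).2.reverse).2.reverse)
            else (res ++ (ascSpec last l).1 ++
                  (dSpecR (ascB last g).2.2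
                      (ascSpec last l).2.reverse).1,
                  (dSpecR (ascB last g).2.2
                      (ascSpec last l).2.reverse).2.reverse)) := by
          simp only [loopA, if_neg hl]
          rw [ha, hd]
        have hstepB : loopB (f2'+1) res g last =
            (if (ascB last g).1 = [] ∧
                (descB (ascB last g).2.2 (ascB last g).2.1.reverse).1 = [] then
              res ++ List.replicate ((g.map (fun p : Char × Int => p.2)).sum).toNat last
            else
              loopB f2' (res ++ (ascB last g).1 ++
                  (descB (ascB last g).2.2 (ascB last g).2.1.reverse).1)
                (descB (ascB last g).2.2 (ascB last g).2.1.reverse).2.1.reverse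
                (descB (ascB last g).2.2 (ascB last g).2.1.reverse).2.2) := by
          simp only [loopB]
        rw [hstepA, hstepB]
        by_cases hmv : (ascSpec last l).1 = [] ∧
            (dSpecR (ascB last g).2.2 (ascSpec last l).2.reverse).1 = []
        · obtain ⟨hm1, hm2⟩ := hmv
          obtain ⟨hr1, hall1⟩ := ascSpec_nil _ _ hm1
          have hm2' := hm2
          rw [hr1] at hm2'
          obtain ⟨hr2, hall2⟩ := dSpecR_nil _ _ hm2'
          have hlast2 : (ascB last g).2.2 = last := by
            rw [a2, ← hP1, hm1]
            rfl
          have hleq : ∀ c ∈ l, c = last := by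
            intro c hc
            have h1 := hall1 c hc
            have h2 := hall2 c (by simpa using hc)
            rw [hlast2] at h2
            exact le_antisymm (not_lt.mp h1) (not_lt.mp h2)
          have hlrep : l = List.replicate l.length last := List.eq_replicate_of_mem hleq
          have hsum : ((g.map (fun p : Char × Int => p.2)).sum).toNat = l.length := by
            rw [← length_expand g hnn, hexp]
          rw [if_neg (by rw [hm1, hm2]; simp),
            if_pos (And.intro (by rw [← hP1]; exact hm1) (by rw [← hP2]; exact hm2))]
          rw [hm1, hr1, hm2', hr2, hsum, ← hlrep]
          simp
        · have hlen1 := ascSpec_length last l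
          have hlen2 := dSpecR_length (ascB last g).2.2
            (ascSpec last l).2.reverse
          have hpos : 1 ≤ (ascSpec last l).1.length +
              (dSpecR (ascB last g).2.2
                  (ascSpec last l).2.reverse).1.length := by
            rcases Decidable.not_and_iff_or_not.mp hmv with h' | h'
            · have : (ascSpec last l).1.length ≠ 0 := by simpa using h'
              omega
            · have : (dSpecR (ascB last g).2.2
                  (ascSpec last l).2.reverse).1.length ≠ 0 := by simpa using h'
              omega
          have hnewlen : (dSpecR (ascB last g).2.2
              (ascSpec last l).2.reverse).2.reverse.length < l.length := by
            simp only [List.length_reverse] at hlen2 ⊢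
            omega
          rw [if_pos (by
            rcases Decidable.not_and_iff_or_not.mp hmv with h' | h'
            · rw [show ((ascSpec last l).1.isEmpty = false) from by
                cases hE : (ascSpec last l).1 with
                | nil => exact absurd hE h'
                | cons x xs => rfl]
              simp
            · rw [show ((dSpecR (ascB last g).2.2
                  (ascSpec last l).2.reverse).1.isEmpty = false) from by
                cases hE : (dSpecR (ascB last g).2.2 (ascSpec last l).2.reverse).1 with
                | nil => exact absurd hE h'
                | cons x xs => rfl]
              simp)]
          rw [if_neg (by rw [← hP1, ← hP2]; exact hmv)]
          have hnnB : ∀ p ∈ (descB (ascB last g).2.2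
              (ascB last g).2.1.reverse).2.1.reverse, 0 ≤ p.2 := by
            intro p hp
            refine descB_nonneg _ _ ?_ p (by simpa using hp)
            intro q hq
            exact ascB_nonneg g last hnn q (by simpa using hq)
          have hexp' : expand (descB (ascB last g).2.2
              (ascB last g).2.1.reverse).2.1.reverse =
              (dSpecR (ascB last g).2.2
                  (ascSpec last l).2.reverse).2.reverse := by
            rw [expand_reverse, ← hR2]
          have hres' : res ++ (ascSpec last l).1 ++
              (dSpecR (ascB last g).2.2
                  (ascSpec last l).2.reverse).1 ≠ [] := by
            simp [hres]
          have hlast' : (res ++ (ascSpec last l).1 ++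
              (dSpecR (ascB last g).2.2
                  (ascSpec last l).2.reverse).1).getLast! =
              (descB (ascB last g).2.2 (ascB last g).2.1.reverse).2.2 := by
            rw [getLast!_append, hP2, d2, ← hla1]
          have hrec := ih f2' ((dSpecR (ascB last g).2.2
                (ascSpec last l).2.reverse).2.reverse)
            (descB (ascB last g).2.2 (ascB last g).2.1.reverse).2.1.reverse
            (res ++ (ascSpec last l).1 ++
                (dSpecR (ascB last g).2.2
                    (ascSpec last l).2.reverse).1)
            ((descB (ascB last g).2.2 (ascB last g).2.1.reverse).2.2)
            (by omega) (by omega) hexp' hnnB hres' hlast'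
          rw [hrec, hP1, hP2]

-- ===== VERDICT (by name: the statement is the Claim_ definition above) =====
theorem oscillator_spec : Claim_equal_oscillator := by
  unfold Claim_equal_oscillator
  intro s _ hpre
  unfold Spec_oscillator oscillator oscillator_alt
  have hsne : s.toList ≠ [] := fun h => hpre (String.toList_eq_nil_iff.mp h)
  have hlen : (PySem.List.sorted s.toList (fun c => c)).length = s.toList.length :=
    PySem.List.length_sorted s.toList (fun c => c) false
  cases hL : PySem.List.sorted s.toList (fun c => c) with
  | nil => rw [hL] at hlen; exact absurd (by simpa using hlen.symm) hsne
  | cons c rest =>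
    obtain ⟨hGexp, hGpos⟩ := buildGroups_spec (c :: rest) [] (by simp)
    cases hG : List.foldl stepRLE [] (c :: rest) with
    | nil => rw [hG] at hGexp; exact absurd hGexp.symm (by simp [expand])
    | cons p g =>
      obtain ⟨c0, k0⟩ := p
      rw [hG] at hGexp hGpos
      have hk0 : 1 ≤ k0 := hGpos (c0, k0) (by simp)
      have hcons : expand ((c0, k0) :: g) = c0 :: expand ((c0, k0 - 1) :: g) := by
        rw [expand_cons, expand_cons, show k0.toNat = (k0 - 1).toNat + 1 from by omega,
          List.replicate_succ]
        simp
      rw [hcons] at hGexp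
      simp only [expand_nil, List.nil_append] at hGexp
      have hc0 : c0 = c := by injection hGexp with h1 _
      have hrest : expand ((c0, k0 - 1) :: g) = rest := by injection hGexp with _ h2
      subst hc0
      have hnn : ∀ q ∈ (c0, k0 - 1) :: g, 0 ≤ q.2 := by
        intro q hq
        rcases List.mem_cons.mp hq with rfl | hq
        · simp; omega
        · have := hGpos q (by simp [hq]); omega
      have hglc : ([c0] : List Char).getLast! = c0 := by
        have h1 := gl_bang [c0] (by simp)
        have h2 : ([c0] : List Char).getLast? = some c0 := rfl
        rw [h2] at h1
        exact (Option.some_inj.mp h1).symm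
      have hlt2 : rest.length < s.toList.length := by
        rw [hL] at hlen
        rw [← hlen]
        simp
      have key := loop_lockstep (rest.length + 1) s.toList.length rest ((c0, k0 - 1) :: g)
        [c0] c0 (by omega) hlt2 hrest hnn (by simp) hglc
      show (match c0 :: rest with
        | [] => ""
        | c :: rest =>
          if rest = [] then String.ofList [c]
          else
            let r := loopA (rest.length + 1) [c] rest
            String.ofList (if r.2 ≠ [] then r.1 ++ r.2 else r.1)) = _
      rw [show buildGroups (c0 :: rest) = (c0, k0) :: g from hG]
      show (if rest = [] then String.ofList [c0]
          else String.ofList (if (loopA (rest.length + 1) [c0] rest).2 ≠ []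
            then (loopA (rest.length + 1) [c0] rest).1 ++ (loopA (rest.length + 1) [c0] rest).2
            else (loopA (rest.length + 1) [c0] rest).1))
        = String.ofList (loopB s.toList.length [c0] ((c0, k0 - 1) :: g) c0)
      rw [← key]
      by_cases hrnil : rest = []
      · subst hrnil
        rw [if_pos rfl]
        simp [loopA]
      · rw [if_neg hrnil]
        congr 1
        by_cases h2 : (loopA (rest.length + 1) [c0] rest).2 = []
        · rw [if_neg (by simp [h2]), h2]
          simp
        · rw [if_pos h2]
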